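-- pv_equiv track=rewrite | github.com/jedbur/matchgate-benchmarking | mgbenchmark/utils.py | generate_binary_strings
-- ===== SOURCE A (Python) =====
-- from itertools import combinations
--
-- def generate_binary_strings(n: int, k: int) -> list[str]:
--     """Generates all binary strings of length n with Hamming weight k.
--
--     Args:
--         n: The length of the binary strings.
--         k: The Hamming weight of the binary strings.
--
--     Returns:
--         nk_list: A list of (n, k)-binary strings, in lexographical order.
--     """
--     nk_list: list[str] = []
--     for indices in combinations(range(n), k):
--         # Create a binary string with '0's
--         binary_string = ["0"] * n
--
--         # Set the positions in the combination to '1'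
--         for index in indices:
--             binary_string[index] = "1"
--
--         # Convert the list of characters back to a string
--         nk_list.append("".join(binary_string))
--
--     return nk_list
-- ===== SOURCE B (Python) =====
-- def generate_binary_strings(n: int, k: int) -> list[str]:
--     """Generates all binary strings of length n with Hamming weight k, by
--     depth-first backtracking with an explicit stack: grow each string one
--     character at a time, '1'-branch explored before '0'-branch (this matches
--     itertools.combinations' index order).  A branch whose remaining weight is
--     unreachable is pruned; a forced branch (no ones left, or all ones) is
--     completed at once."""
--     out: list[str] = []
--     stack = [("", k)]
--     while stack:
--         prefix, r = stack.pop()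
--         m = n - len(prefix)
--         if r < 0 or r > max(m, 0):
--             continue
--         if r == 0:
--             out.append(prefix + "0" * m)
--             continue
--         if r == m:
--             out.append(prefix + "1" * m)
--             continue
--         stack.append((prefix + "0", r))
--         stack.append((prefix + "1", r - 1))
--     return out
-- ===== Notes on version B (the rewrite author's own statement) =====
-- stated objective: alternative
-- what changed: Replaces the combinations-of-indices enumeration (build an n-char '0' buffer and set chosen positions for each index tuple) with a direct recursive backtracking enumeration that grows each string one character at a time, '1'-branch before '0'-branch, pruning branches where the remaining weight is unreachable.
import Mathlib
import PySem

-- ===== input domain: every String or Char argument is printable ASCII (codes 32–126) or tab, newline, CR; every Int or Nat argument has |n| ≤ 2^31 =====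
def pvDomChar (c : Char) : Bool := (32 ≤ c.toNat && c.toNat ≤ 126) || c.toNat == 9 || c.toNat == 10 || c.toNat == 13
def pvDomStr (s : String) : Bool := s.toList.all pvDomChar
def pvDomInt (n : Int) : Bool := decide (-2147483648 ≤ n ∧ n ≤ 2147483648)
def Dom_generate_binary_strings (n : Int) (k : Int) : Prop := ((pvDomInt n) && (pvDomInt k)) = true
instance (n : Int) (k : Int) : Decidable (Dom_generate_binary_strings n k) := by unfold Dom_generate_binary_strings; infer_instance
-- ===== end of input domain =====

-- B is an alternative: direct recursive enumeration of the strings instead of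
-- building each string from an index combination; return values proved equal on Pre_.

-- ===== PORT A =====
-- itertools.combinations(xs, r) in lexicographic order of index tuples:
-- the combinations containing the head come first.
def pyCombinations (xs : List Nat) (r : Nat) : List (List Nat) :=
  match r, xs with
  | 0, _ => [[]]
  | _ + 1, [] => []
  | r + 1, x :: t => (pyCombinations t r).map (x :: ·) ++ pyCombinations t (r + 1)

-- ["0"] * n, set positions of `indices` to "1", then "".join (chars, exact).
def buildStringA (n : Nat) (indices : List Nat) : String :=
  String.ofList (indices.foldl (fun bs i => bs.set i '1') (List.replicate n '0'))

-- for indices in combinations(range(n), k): append the built string.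
-- (k < 0 raises ValueError in Python and is excluded by Pre_; range(n) is empty for n ≤ 0.)
def generate_binary_strings (n : Int) (k : Int) : List String :=
  (pyCombinations (List.range n.toNat) k.toNat).map (buildStringA n.toNat)

-- ===== PORT B =====
-- the while loop of Source B: the Python list used as a stack (append/pop at the
-- end) is modelled as a Lean list pushed/popped at the HEAD; the str prefix is
-- modelled as its list of characters ("" = [], prefix + "0" = p ++ ['0']).
def bLoop (n : Int) : Nat → List (List Char × Int) → List String → List String
  | 0, _, out => out            -- fuel exhausted (never reached: the caller supplies enough fuel)
  | _ + 1, [], out => out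
  | fuel + 1, (p, r) :: rest, out =>
    if r < 0 ∨ r > max (n - (p.length : Int)) 0 then bLoop n fuel rest out
    else if r = 0 then
      bLoop n fuel rest (out ++ [String.ofList (p ++ List.replicate (n - (p.length : Int)).toNat '0')])
    else if r = n - (p.length : Int) then
      bLoop n fuel rest (out ++ [String.ofList (p ++ List.replicate (n - (p.length : Int)).toNat '1')])
    else bLoop n fuel ((p ++ ['1'], r - 1) :: (p ++ ['0'], r) :: rest) out

def generate_binary_strings_alt (n : Int) (k : Int) : List String :=
  bLoop n (3 ^ n.toNat + 1) [([], k)] []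

-- ===== PRECONDITION & SPEC =====
-- Pre_ excludes exactly k < 0, where Python A raises ValueError (combinations rejects r < 0).
def Pre_generate_binary_strings (n : Int) (k : Int) : Prop := 0 ≤ k
instance (n : Int) (k : Int) : Decidable (Pre_generate_binary_strings n k) := by
  unfold Pre_generate_binary_strings; infer_instance

def pvWitness_generate_binary_strings : Int × Int := (3, 2)

def Spec_generate_binary_strings (n : Int) (k : Int) (out : List String) : Prop :=
  out = generate_binary_strings_alt n k
instance (n : Int) (k : Int) (out : List String) : Decidable (Spec_generate_binary_strings n k out) := by
  unfold Spec_generate_binary_strings; infer_instance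

-- ===== CLAIM (what is proved, stated in full; the proofs are below) =====
def Claim_equal_generate_binary_strings : Prop :=
  ∀ (n : Int) (k : Int), Dom_generate_binary_strings n k →
    Pre_generate_binary_strings n k →
    Spec_generate_binary_strings n k (generate_binary_strings n k)

-- ===== LEMMAS AND PROOFS =====

-- proof-side characterization of B's backtracking: the list of weight-r
-- strings of length m that the DFS under one stack node produces
def goB : Nat → Int → List String
  | 0, r => if r = 0 then [""] else []
  | m + 1, r =>
    if r < 0 ∨ r > (m : Int) + 1 then []
    else (goB m (r - 1)).map (fun s => "1" ++ s) ++ (goB m r).map (fun s => "0" ++ s)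

-- the '1'/'0' pattern of combination c over ground list g
def stringifyL (g : List Nat) (c : List Nat) : List Char :=
  g.map (fun i => if i ∈ c then '1' else '0')

theorem pyCombinations_subset {g : List Nat} {r : Nat} {c : List Nat}
    (h : c ∈ pyCombinations g r) : c ⊆ g := by
  induction g generalizing r c with
  | nil =>
    cases r with
    | zero => simp [pyCombinations] at h; simp [h]
    | succ r => simp [pyCombinations] at h
  | cons x t ih =>
    cases r with
    | zero => simp [pyCombinations] at h; simp [h]
    | succ r =>
      simp only [pyCombinations, List.mem_append, List.mem_map] at h
      rcases h with ⟨c', hc', rfl⟩ | h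
      · intro a ha
        rcases List.mem_cons.mp ha with rfl | ha
        · exact List.mem_cons_self
        · exact List.mem_cons_of_mem _ (ih hc' ha)
      · exact fun a ha => List.mem_cons_of_mem _ (ih h ha)

theorem pyCombinations_len_lt {g : List Nat} {r : Nat} (h : g.length < r) :
    pyCombinations g r = [] := by
  induction g generalizing r with
  | nil => cases r with
    | zero => omega
    | succ r => simp [pyCombinations]
  | cons x t ih =>
    cases r with
    | zero => omega
    | succ r =>
      simp only [List.length_cons] at h
      have h1 := ih (r := r) (by omega)
      have h2 := ih (r := r + 1) (by omega)
      simp [pyCombinations, h1, h2]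

theorem goB_neg {m : Nat} {r : Int} (h : r < 0) : goB m r = [] := by
  cases m with
  | zero => simp [goB]; omega
  | succ m => simp only [goB]; rw [if_pos (Or.inl h)]

theorem string_ofList_cons (a : Char) (l : List Char) :
    String.ofList (a :: l) = String.ofList [a] ++ String.ofList l := by
  rw [← String.ofList_append]; rfl

theorem goB_gt {m : Nat} {r : Int} (h : (m : Int) < r) : goB m r = [] := by
  cases m with
  | zero => simp [goB]; omega
  | succ m => simp only [goB]; rw [if_pos (Or.inr (by push_cast; push_cast at h; omega))]

theorem goB_zero (m : Nat) : goB m 0 = [String.ofList (List.replicate m '0')] := by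
  induction m with
  | zero => simp [goB]
  | succ m ih =>
    rw [show goB (m + 1) 0
          = (goB m (0 - 1)).map (fun s => "1" ++ s) ++ (goB m 0).map (fun s => "0" ++ s) from by
        simp only [goB]
        rw [if_neg (show ¬((0 : Int) < 0 ∨ (0 : Int) > (m : Int) + 1) from by omega)]]
    rw [show (0 : Int) - 1 = (-1 : Int) from by norm_num, goB_neg (by norm_num), ih]
    simp only [List.map_nil, List.nil_append, List.map_cons]
    rw [List.replicate_succ, string_ofList_cons]

theorem goB_all (m : Nat) : goB m (m : Int) = [String.ofList (List.replicate m '1')] := by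
  induction m with
  | zero => simp [goB]
  | succ m ih =>
    rw [show goB (m + 1) ((m + 1 : Nat) : Int)
          = (goB m (((m + 1 : Nat) : Int) - 1)).map (fun s => "1" ++ s)
            ++ (goB m ((m + 1 : Nat) : Int)).map (fun s => "0" ++ s) from by
        simp only [goB]
        rw [if_neg (show ¬(((m + 1 : Nat) : Int) < 0 ∨ ((m + 1 : Nat) : Int) > (m : Int) + 1)
          from by push_cast; omega)]]
    rw [show ((m + 1 : Nat) : Int) - 1 = (m : Int) from by push_cast; ring, ih,
      goB_gt (show (m : Int) < ((m + 1 : Nat) : Int) from by push_cast; omega)]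
    simp only [List.map_cons, List.map_nil, List.append_nil]
    rw [List.replicate_succ, string_ofList_cons]

-- the loop invariant: with enough fuel, bLoop appends, in order, the DFS
-- output of every stack node
def stackMeasure (n : Int) (stack : List (List Char × Int)) : Nat :=
  (stack.map (fun q => 3 ^ (n - (q.1.length : Int)).toNat)).sum

theorem bLoop_spec (n : Int) (fuel : Nat) (stack : List (List Char × Int)) (out : List String)
    (hf : stackMeasure n stack < fuel) :
    bLoop n fuel stack out = out ++ stack.flatMap
      (fun q => (goB (n - (q.1.length : Int)).toNat q.2).map (fun s => String.ofList q.1 ++ s)) := by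
  induction fuel generalizing stack out with
  | zero => exact absurd hf (by omega)
  | succ fuel ih =>
    match stack with
    | [] => simp [bLoop]
    | (p, r) :: rest =>
      have hms : stackMeasure n ((p, r) :: rest)
          = 3 ^ (n - (p.length : Int)).toNat + stackMeasure n rest := by
        simp [stackMeasure]
      have hpow1 : 1 ≤ 3 ^ (n - (p.length : Int)).toNat := Nat.one_le_pow _ _ (by omega)
      by_cases hg : r < 0 ∨ r > max (n - (p.length : Int)) 0
      · rw [bLoop, if_pos hg, ih _ _ (by omega)]
        have hemp : goB (n - (p.length : Int)).toNat r = [] := by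
          rcases hg with hg | hg
          · exact goB_neg hg
          · exact goB_gt (by omega)
        rw [List.flatMap_cons, hemp]
        simp
      · by_cases h0 : r = 0
        · rw [bLoop, if_neg hg, if_pos h0, ih _ _ (by omega), h0]
          rw [List.flatMap_cons, goB_zero]
          simp [String.ofList_append]
        · by_cases hm : r = n - (p.length : Int)
          · rw [bLoop, if_neg hg, if_neg h0, if_pos hm, ih _ _ (by omega), hm]
            have hm1 : 0 ≤ n - (p.length : Int) := by
              by_cases h : 0 ≤ n - (p.length : Int)
              · exact h
              · exact absurd (Or.inl (by omega)) hg
            rw [List.flatMap_cons,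
              show goB (n - (p.length : Int)).toNat (n - (p.length : Int))
                  = goB (n - (p.length : Int)).toNat (((n - (p.length : Int)).toNat : Nat) : Int)
                from by rw [Int.toNat_of_nonneg hm1],
              goB_all]
            simp [String.ofList_append]
          · have hr0 : 0 ≤ r := by
              by_cases h : 0 ≤ r
              · exact h
              · exact absurd (Or.inl (by omega)) hg
            have hrm : r ≤ n - (p.length : Int) := by
              by_cases h : r ≤ n - (p.length : Int)
              · exact h
              · exact absurd (Or.inr (by omega)) hg
            obtain ⟨m', hM⟩ : ∃ m', (n - (p.length : Int)).toNat = m' + 1 :=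
              ⟨(n - (p.length : Int)).toNat - 1, by omega⟩
            have hl1 : (n - ((p ++ ['1']).length : Int)).toNat = m' := by simp; omega
            have hl0 : (n - ((p ++ ['0']).length : Int)).toNat = m' := by simp; omega
            have hfn : stackMeasure n ((p ++ ['1'], r - 1) :: (p ++ ['0'], r) :: rest) < fuel := by
              have hms2 : stackMeasure n ((p ++ ['1'], r - 1) :: (p ++ ['0'], r) :: rest)
                  = 3 ^ m' + (3 ^ m' + stackMeasure n rest) := by
                simp only [stackMeasure, List.map_cons, List.sum_cons, hl1, hl0]
              have h3 : 3 ^ (m' + 1) = 3 ^ m' * 3 := by rw [pow_succ]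
              have hp : 1 ≤ 3 ^ m' := Nat.one_le_pow _ _ (by omega)
              rw [hms2]
              rw [hms, hM] at hf
              omega
            rw [bLoop, if_neg hg, if_neg h0, if_neg hm, ih _ _ hfn]
            simp only [List.flatMap_cons, hl1, hl0, hM]
            rw [show goB (m' + 1) r = (goB m' (r - 1)).map (fun s => "1" ++ s)
                  ++ (goB m' r).map (fun s => "0" ++ s) from by
                simp only [goB]
                rw [if_neg (show ¬(r < 0 ∨ r > (m' : Int) + 1) from by omega)]]
            simp only [List.map_append, List.map_map, List.append_assoc]
            rw [show (fun s => String.ofList (p ++ ['1']) ++ s)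
                  = ((fun s => String.ofList p ++ s) ∘ fun s => "1" ++ s) from by
                funext s; simp only [Function.comp_apply]
                rw [String.ofList_append, String.append_assoc],
              show (fun s => String.ofList (p ++ ['0']) ++ s)
                  = ((fun s => String.ofList p ++ s) ∘ fun s => "0" ++ s) from by
                funext s; simp only [Function.comp_apply]
                rw [String.ofList_append, String.append_assoc]]

theorem alt_eq_goB (n : Int) (k : Int) :
    generate_binary_strings_alt n k = goB n.toNat k := by
  unfold generate_binary_strings_alt
  rw [bLoop_spec n _ _ _ (by simp [stackMeasure])]
  simp

theorem stringify_cons_notmem {x : Nat} {t c : List Nat} (hx : x ∉ t) :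
    stringifyL t (x :: c) = stringifyL t c := by
  unfold stringifyL
  refine List.map_congr_left (fun j hj => ?_)
  have : j ≠ x := fun h => hx (h ▸ hj)
  simp [this]

theorem foldl_set_getElem? (c : List Nat) (bs : List Char) (j : Nat) :
    (c.foldl (fun bs i => bs.set i '1') bs)[j]? =
      if j ∈ c ∧ j < bs.length then some '1' else bs[j]? := by
  induction c generalizing bs with
  | nil => simp
  | cons x t ih =>
    simp only [List.foldl_cons]
    rw [ih, List.length_set, List.getElem?_set]
    simp only [List.mem_cons]
    by_cases hm : j ∈ t
    · by_cases hl : j < bs.length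
      · simp [hm, hl]
      · have hb : bs[j]? = none := List.getElem?_eq_none (by omega)
        by_cases hxe : x = j
        · subst hxe; simp [hm, hl, hb]
        · simp [hm, hl, hxe]
    · by_cases hxe : x = j
      · subst hxe
        by_cases hl : x < bs.length
        · simp [hm, hl]
        · have hb : bs[x]? = none := List.getElem?_eq_none (by omega)
          simp [hm, hl, hb]
      · have : ¬j = x := fun h => hxe h.symm
        simp [hm, hxe, this]

-- buildStringA equals the membership pattern over range n
theorem buildStringA_eq (n : Nat) (c : List Nat) :
    buildStringA n c = String.ofList (stringifyL (List.range n) c) := by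
  unfold buildStringA
  congr 1
  apply List.ext_getElem?
  intro j
  rw [foldl_set_getElem?]
  unfold stringifyL
  by_cases hn : j < n
  · simp [List.getElem?_map, List.getElem?_range, hn, List.length_replicate]
    by_cases hc : j ∈ c <;> simp [hc]
  · have h1 : (List.replicate n '0')[j]? = none := by
      rw [List.getElem?_eq_none]; simp; omega
    have h2 : ((List.range n).map (fun i => if i ∈ c then '1' else '0'))[j]? = none := by
      rw [List.getElem?_eq_none]; simp; omega
    simp [List.length_replicate, hn, h1, h2]


-- main bridge: combinations rendered through stringifyL equals B's recursion
theorem main_bridge (g : List Nat) (r : Nat) (hnd : g.Nodup) :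
    (pyCombinations g r).map (fun c => String.ofList (stringifyL g c)) = goB g.length (r : Int) := by
  induction g generalizing r with
  | nil =>
    cases r with
    | zero => simp [pyCombinations, stringifyL, goB]
    | succ r =>
      simp [pyCombinations, goB]
      omega
  | cons x t ih =>
    have hx : x ∉ t := (List.nodup_cons.mp hnd).1
    have hndt : t.Nodup := (List.nodup_cons.mp hnd).2
    cases r with
    | zero =>
      simp only [pyCombinations, List.map_cons, List.map_nil, List.length_cons]
      have h0 : stringifyL (x :: t) [] = '0' :: stringifyL t [] := by
        simp [stringifyL]
      rw [h0, string_ofList_cons]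
      simp only [goB, Nat.cast_zero]
      rw [if_neg (by omega)]
      rw [show (0 : Int) - 1 = (-1 : Int) by norm_num, goB_neg (by norm_num)]
      have iht := ih 0 hndt
      simp only [Nat.cast_zero] at iht
      rw [← iht]
      simp only [pyCombinations, List.map_cons, List.map_nil, List.nil_append]
    | succ r =>
      by_cases hbig : t.length + 1 < r + 1
      · rw [pyCombinations_len_lt (by simpa using hbig)]
        simp only [List.map_nil, List.length_cons, goB]
        rw [if_pos (Or.inr (by push_cast; omega))]
      · simp only [pyCombinations, List.map_append, List.map_map, List.length_cons]
        simp only [goB]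
        rw [if_neg (by push_cast; omega)]
        rw [show ((r + 1 : Nat) : Int) - 1 = (r : Int) by push_cast; ring]
        congr 1
        · rw [← ih r hndt, List.map_map]
          refine List.map_congr_left (fun c hc => ?_)
          simp only [Function.comp]
          have h1 : stringifyL (x :: t) (x :: c) = '1' :: stringifyL t c := by
            rw [show stringifyL (x :: t) (x :: c)
                  = (if x ∈ (x :: c) then '1' else '0') :: stringifyL t (x :: c) from rfl,
               stringify_cons_notmem hx, if_pos List.mem_cons_self]
          rw [h1, string_ofList_cons]
        · rw [← ih (r + 1) hndt, List.map_map]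
          refine List.map_congr_left (fun c hc => ?_)
          simp only [Function.comp]
          have hxc : x ∉ c := fun h => hx (pyCombinations_subset hc h)
          have h0 : stringifyL (x :: t) c = '0' :: stringifyL t c := by
            rw [show stringifyL (x :: t) c
                  = (if x ∈ c then '1' else '0') :: stringifyL t c from rfl, if_neg hxc]
          rw [h0, string_ofList_cons]

-- ===== VERDICT (by name: the statement is the Claim_ definition above) =====
theorem generate_binary_strings_spec : Claim_equal_generate_binary_strings := by
  intro n k _ hk
  unfold Spec_generate_binary_strings generate_binary_strings
  rw [alt_eq_goB]
  have h1 : ∀ c ∈ pyCombinations (List.range n.toNat) k.toNat,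
      buildStringA n.toNat c = String.ofList (stringifyL (List.range n.toNat) c) :=
    fun c _ => buildStringA_eq n.toNat c
  rw [List.map_congr_left h1, main_bridge (List.range n.toNat) k.toNat (List.nodup_range)]
  rw [List.length_range, Int.toNat_of_nonneg hk]
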